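-- pv_equiv track=rewrite | github.com/database-ai4db-group/Dotil | PreKar/src/cost_execution.py | construct_join_sql
-- ===== SOURCE A (Python) =====
-- def construct_join_sql(sql, temp_storage_list, i, all_predicates_types, all_types):
--     """
--     递归构造，获取存储结构数据的sql语句
--     :param sql: 当前（递归层）已有的sql语句
--     :param temp_storage_list:   存储结构
--     :param i:   当前（递归层）序号，最大值为存储结构的大小，初值为1
--     :param all_predicates_types:    列名LIST（所有谓词和所有type的宾语集LIST）
--     :param all_types:   所有type的宾语集LIST
--     :return:    获取存储结构temp_storage_list数据的sql语句
--     """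
--     # 递归结束条件
--     if i > len(temp_storage_list):
--         return sql
--     # 递归开始条件（i初值必须为1）
--     if i == 1:
--         # 与当存储结构中只有一个predicate时的sql等价
--         if temp_storage_list[0] not in all_types:
--             return construct_join_sql(
--                 "select t0.s, t0.o from t0 where p = '{0}'".format(temp_storage_list[0]),
--                 temp_storage_list, i + 1, all_predicates_types, all_types)
--         else:
--             return construct_join_sql(
--                 "select t0.s, t0.o from t0 where p = '{0}' and o = '{1}'".format(
--                     "<http://www.w3.org/1999/02/22-rdf-syntax-ns#type>", temp_storage_list[0]),
--                 temp_storage_list, i + 1, all_predicates_types, all_types)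
--     if i == 2:
--         # 与当存储结构中只有两个predicate时的sql等价
--         if temp_storage_list[i - 1] not in all_types:
--             q = "select t0.s, t0.o from t0 where p = '{0}'".format(temp_storage_list[i - 1])
--         else:
--             q = "select t0.s, t0.o from t0 where p = '{0}' and o = '{1}'".format(
--                 "<http://www.w3.org/1999/02/22-rdf-syntax-ns#type>", temp_storage_list[i - 1])
--         new_sql = "select a.s, a.{0}, a.{1} from (" \
--                   "(select a.s s, a.o {0}, b.o {1} from ({2}) a left join ({3}) b on a.s=b.s)" \
--                   " union " \
--                   "(select b.s s, a.o {0}, b.o {1} from ({2}) a right join ({3}) b on a.s=b.s)" \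
--                   ") a".format(
--             "pred" + str(all_predicates_types.index(temp_storage_list[i - 2])),
--             "pred" + str(all_predicates_types.index(temp_storage_list[i - 1])),
--             sql, q)
--         return construct_join_sql(new_sql, temp_storage_list, i + 1, all_predicates_types, all_types)
--     if i > 2:
--         if temp_storage_list[i - 1] not in all_types:
--             q = "select t0.s, t0.o from t0 where p = '{0}'".format(temp_storage_list[i - 1])
--         else:
--             q = "select t0.s, t0.o from t0 where p = '{0}' and o = '{1}'".format(
--                 "<http://www.w3.org/1999/02/22-rdf-syntax-ns#type>", temp_storage_list[i - 1])
--         new_sql = "select a.s, " + ", ".join(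
--             ["a.pred" + str(all_predicates_types.index(temp_storage_list[k])) for k in range(i)]) \
--                   + " from (" \
--                     "(select a.s, " + ", ".join(
--             ["a.pred" + str(all_predicates_types.index(temp_storage_list[k])) for k in range(i - 1)]) \
--                   + ", b.o pred" + str(all_predicates_types.index(temp_storage_list[i - 1])) \
--                   + " from ({0}) a left join ({1}) b on a.s=b.s)".format(sql, q) \
--                   + " union " \
--                     "(select b.s, " + ", ".join(
--             ["a.pred" + str(all_predicates_types.index(temp_storage_list[k])) for k in range(i - 1)]) \
--                   + ", b.o pred" + str(all_predicates_types.index(temp_storage_list[i - 1])) \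
--                   + " from ({0}) a right join ({1}) b on a.s=b.s)".format(sql, q) \
--                   + ") a"
--         return construct_join_sql(new_sql, temp_storage_list, i + 1, all_predicates_types, all_types)
-- ===== SOURCE B (Python) =====
-- def _subquery(p, all_types):
--     if p in all_types:
--         return ("select t0.s, t0.o from t0 where p = "
--                 "'<http://www.w3.org/1999/02/22-rdf-syntax-ns#type>' and o = '" + p + "'")
--     return "select t0.s, t0.o from t0 where p = '" + p + "'"
--
--
-- def construct_join_sql(sql, temp_storage_list, i, all_predicates_types, all_types):
--     n = len(temp_storage_list)
--
--     def pred(k):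
--         return "pred" + str(all_predicates_types.index(temp_storage_list[k]))
--
--     j = i
--     while j <= n:
--         if j == 1:
--             sql = _subquery(temp_storage_list[0], all_types)
--         elif j == 2:
--             q = _subquery(temp_storage_list[1], all_types)
--             inner = "a.o " + pred(0) + ", b.o " + pred(1) + " from (" + sql + ") a "
--             sql = ("select a.s, a." + pred(0) + ", a." + pred(1) + " from ("
--                    + "(select a.s s, " + inner + "left join (" + q + ") b on a.s=b.s)"
--                    + " union "
--                    + "(select b.s s, " + inner + "right join (" + q + ") b on a.s=b.s)"
--                    + ") a")
--         elif j > 2: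
--             q = _subquery(temp_storage_list[j - 1], all_types)
--             outer = ", ".join("a." + pred(k) for k in range(j))
--             inner = (", ".join("a." + pred(k) for k in range(j - 1))
--                      + ", b.o " + pred(j - 1) + " from (" + sql + ") a ")
--             sql = ("select a.s, " + outer + " from ("
--                    + "(select a.s, " + inner + "left join (" + q + ") b on a.s=b.s)"
--                    + " union "
--                    + "(select b.s, " + inner + "right join (" + q + ") b on a.s=b.s)"
--                    + ") a")
--         j += 1
--     return sql
-- ===== Notes on version B (the rewrite author's own statement) =====
-- stated objective: alternative
-- what changed: The tail recursion is replaced by an explicit iterative loop over the step numbers, with the duplicated subquery / pred-name / union-half string templates factored into shared helpers.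
-- outside the precondition, e.g. on construct_join_sql('x', ['a'], 0, [], []): A returns None, B returns "select t0.s, t0.o from t0 where p = 'a'"; on construct_join_sql('', ['a', 'b'], 1, [], []): A raises ValueError, B raises ValueError
import Mathlib
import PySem

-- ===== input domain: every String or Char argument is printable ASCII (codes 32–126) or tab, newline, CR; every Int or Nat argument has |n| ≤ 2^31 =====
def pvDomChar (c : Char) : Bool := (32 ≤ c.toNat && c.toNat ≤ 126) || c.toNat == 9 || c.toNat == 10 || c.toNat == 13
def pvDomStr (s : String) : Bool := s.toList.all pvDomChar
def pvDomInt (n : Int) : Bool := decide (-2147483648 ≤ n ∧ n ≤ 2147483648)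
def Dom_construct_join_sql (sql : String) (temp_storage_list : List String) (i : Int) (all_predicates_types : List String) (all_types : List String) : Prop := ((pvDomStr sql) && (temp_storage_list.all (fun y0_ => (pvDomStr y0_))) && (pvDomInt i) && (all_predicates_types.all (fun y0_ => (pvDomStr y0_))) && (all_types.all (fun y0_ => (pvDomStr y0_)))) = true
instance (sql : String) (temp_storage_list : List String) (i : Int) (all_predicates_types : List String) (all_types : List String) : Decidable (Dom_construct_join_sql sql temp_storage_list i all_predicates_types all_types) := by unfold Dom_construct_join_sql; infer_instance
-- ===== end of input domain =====

-- B rewrites A's tail recursion as an iterative pass (a fold over the remaining step numbers)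
-- with the duplicated subquery / column-name / union-half templates factored into shared helpers;
-- same cost ("alternative"), return value only (no argument is mutated by either version).

-- ===== PORT A =====
-- `list.index` raises ValueError when the element is absent; Pre_ excludes those inputs,
-- `.getD 0` is a total stand-in there.  The final `else sql` branch corresponds to Python
-- falling through and returning None (only reachable for i < 1, excluded by Pre_).
def construct_join_sql (sql : String) (temp_storage_list : List String) (i : Int) (all_predicates_types : List String) (all_types : List String) : String :=
  if (temp_storage_list.length : Int) < i then
    sql
  else if i = 1 then
    if (PySem.List.pyGetD temp_storage_list 0 "") ∉ all_types then
      construct_join_sql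
        ("select t0.s, t0.o from t0 where p = '" ++ PySem.List.pyGetD temp_storage_list 0 "" ++ "'")
        temp_storage_list (i + 1) all_predicates_types all_types
    else
      construct_join_sql
        ("select t0.s, t0.o from t0 where p = '<http://www.w3.org/1999/02/22-rdf-syntax-ns#type>' and o = '"
          ++ PySem.List.pyGetD temp_storage_list 0 "" ++ "'")
        temp_storage_list (i + 1) all_predicates_types all_types
  else if i = 2 then
    let q := if (PySem.List.pyGetD temp_storage_list (i - 1) "") ∉ all_types then
        "select t0.s, t0.o from t0 where p = '" ++ PySem.List.pyGetD temp_storage_list (i - 1) "" ++ "'"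
      else
        "select t0.s, t0.o from t0 where p = '<http://www.w3.org/1999/02/22-rdf-syntax-ns#type>' and o = '"
          ++ PySem.List.pyGetD temp_storage_list (i - 1) "" ++ "'"
    let p0 := "pred" ++ PySem.Int.toStr (((PySem.List.index? all_predicates_types (PySem.List.pyGetD temp_storage_list (i - 2) "")).getD 0 : Nat) : Int)
    let p1 := "pred" ++ PySem.Int.toStr (((PySem.List.index? all_predicates_types (PySem.List.pyGetD temp_storage_list (i - 1) "")).getD 0 : Nat) : Int)
    let new_sql := "select a.s, a." ++ p0 ++ ", a." ++ p1 ++ " from (" ++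
      "(select a.s s, a.o " ++ p0 ++ ", b.o " ++ p1 ++ " from (" ++ sql ++ ") a left join (" ++ q ++ ") b on a.s=b.s)" ++
      " union " ++
      "(select b.s s, a.o " ++ p0 ++ ", b.o " ++ p1 ++ " from (" ++ sql ++ ") a right join (" ++ q ++ ") b on a.s=b.s)" ++
      ") a"
    construct_join_sql new_sql temp_storage_list (i + 1) all_predicates_types all_types
  else if 2 < i then
    let q := if (PySem.List.pyGetD temp_storage_list (i - 1) "") ∉ all_types then
        "select t0.s, t0.o from t0 where p = '" ++ PySem.List.pyGetD temp_storage_list (i - 1) "" ++ "'"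
      else
        "select t0.s, t0.o from t0 where p = '<http://www.w3.org/1999/02/22-rdf-syntax-ns#type>' and o = '"
          ++ PySem.List.pyGetD temp_storage_list (i - 1) "" ++ "'"
    let idx := fun (k : Int) => PySem.Int.toStr (((PySem.List.index? all_predicates_types (PySem.List.pyGetD temp_storage_list k "")).getD 0 : Nat) : Int)
    let new_sql := "select a.s, " ++ PySem.Str.join ", " ((PySem.List.pyRange 0 i 1).map (fun k => "a.pred" ++ idx k)) ++
      " from (" ++ "(select a.s, " ++ PySem.Str.join ", " ((PySem.List.pyRange 0 (i - 1) 1).map (fun k => "a.pred" ++ idx k)) ++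
      ", b.o pred" ++ idx (i - 1) ++ " from (" ++ sql ++ ") a left join (" ++ q ++ ") b on a.s=b.s)" ++
      " union " ++ "(select b.s, " ++ PySem.Str.join ", " ((PySem.List.pyRange 0 (i - 1) 1).map (fun k => "a.pred" ++ idx k)) ++
      ", b.o pred" ++ idx (i - 1) ++ " from (" ++ sql ++ ") a right join (" ++ q ++ ") b on a.s=b.s)" ++
      ") a"
    construct_join_sql new_sql temp_storage_list (i + 1) all_predicates_types all_types
  else
    sql
termination_by ((temp_storage_list.length : Int) + 1 - i).toNat
decreasing_by all_goals omega

-- ===== PORT B =====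
def pyB_subquery (p : String) (all_types : List String) : String :=
  if p ∈ all_types then
    "select t0.s, t0.o from t0 where p = '<http://www.w3.org/1999/02/22-rdf-syntax-ns#type>' and o = '" ++ p ++ "'"
  else
    "select t0.s, t0.o from t0 where p = '" ++ p ++ "'"

def pyB_pred (temp_storage_list all_predicates_types : List String) (k : Int) : String :=
  "pred" ++ PySem.Int.toStr (((PySem.List.index? all_predicates_types (PySem.List.pyGetD temp_storage_list k "")).getD 0 : Nat) : Int)

-- one iteration of B's while loop, dispatching on the current step number j
def pyB_step (temp_storage_list all_predicates_types all_types : List String) (sql : String) (j : Int) : String :=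
  if j = 1 then
    pyB_subquery (PySem.List.pyGetD temp_storage_list 0 "") all_types
  else if j = 2 then
    let q := pyB_subquery (PySem.List.pyGetD temp_storage_list 1 "") all_types
    let inner := "a.o " ++ pyB_pred temp_storage_list all_predicates_types 0 ++ ", b.o " ++
      pyB_pred temp_storage_list all_predicates_types 1 ++ " from (" ++ sql ++ ") a "
    "select a.s, a." ++ pyB_pred temp_storage_list all_predicates_types 0 ++ ", a." ++
      pyB_pred temp_storage_list all_predicates_types 1 ++ " from (" ++
      "(select a.s s, " ++ inner ++ "left join (" ++ q ++ ") b on a.s=b.s)" ++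
      " union " ++
      "(select b.s s, " ++ inner ++ "right join (" ++ q ++ ") b on a.s=b.s)" ++
      ") a"
  else if 2 < j then
    let q := pyB_subquery (PySem.List.pyGetD temp_storage_list (j - 1) "") all_types
    let outer := PySem.Str.join ", " ((PySem.List.pyRange 0 j 1).map (fun k => "a." ++ pyB_pred temp_storage_list all_predicates_types k))
    let inner := PySem.Str.join ", " ((PySem.List.pyRange 0 (j - 1) 1).map (fun k => "a." ++ pyB_pred temp_storage_list all_predicates_types k)) ++
      ", b.o " ++ pyB_pred temp_storage_list all_predicates_types (j - 1) ++ " from (" ++ sql ++ ") a "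
    "select a.s, " ++ outer ++ " from (" ++
      "(select a.s, " ++ inner ++ "left join (" ++ q ++ ") b on a.s=b.s)" ++
      " union " ++
      "(select b.s, " ++ inner ++ "right join (" ++ q ++ ") b on a.s=b.s)" ++
      ") a"
  else
    sql

def construct_join_sql_alt (sql : String) (temp_storage_list : List String) (i : Int) (all_predicates_types : List String) (all_types : List String) : String :=
  (PySem.List.pyRange i ((temp_storage_list.length : Int) + 1) 1).foldl
    (pyB_step temp_storage_list all_predicates_types all_types) sql

-- ===== PRECONDITION & SPEC =====
-- Pre_ excludes exactly the inputs where Python A does not return a string: i < 1 with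
-- i ≤ len(temp_storage_list) falls through every branch and returns None, and a storage
-- element missing from all_predicates_types makes `.index` raise ValueError.
def Pre_construct_join_sql (sql : String) (temp_storage_list : List String) (i : Int) (all_predicates_types : List String) (all_types : List String) : Prop :=
  1 ≤ i ∧ (i ≤ (temp_storage_list.length : Int) → 2 ≤ temp_storage_list.length →
    ∀ x ∈ temp_storage_list, x ∈ all_predicates_types)
instance (sql : String) (temp_storage_list : List String) (i : Int) (all_predicates_types : List String) (all_types : List String) : Decidable (Pre_construct_join_sql sql temp_storage_list i all_predicates_types all_types) := by unfold Pre_construct_join_sql; infer_instance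

def pvWitness_construct_join_sql : String × List String × Int × List String × List String :=
  ("", ["p1", "p2"], 1, ["p1", "p2"], ["p2"])

def Spec_construct_join_sql (sql : String) (temp_storage_list : List String) (i : Int) (all_predicates_types : List String) (all_types : List String) (out : String) : Prop := out = construct_join_sql_alt sql temp_storage_list i all_predicates_types all_types
instance (sql : String) (temp_storage_list : List String) (i : Int) (all_predicates_types : List String) (all_types : List String) (out : String) : Decidable (Spec_construct_join_sql sql temp_storage_list i all_predicates_types all_types out) := by unfold Spec_construct_join_sql; infer_instance

-- ===== CLAIM (what is proved, stated in full; the proofs are below) =====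
def Claim_equal_construct_join_sql : Prop := ∀ (sql : String) (temp_storage_list : List String) (i : Int) (all_predicates_types : List String) (all_types : List String), Dom_construct_join_sql sql temp_storage_list i all_predicates_types all_types → Pre_construct_join_sql sql temp_storage_list i all_predicates_types all_types → Spec_construct_join_sql sql temp_storage_list i all_predicates_types all_types (construct_join_sql sql temp_storage_list i all_predicates_types all_types)

-- ===== LEMMAS AND PROOFS =====

-- literal-merge rewrites used to align the two append groupings (left-associated form)
theorem mA : "a." ++ "pred" = ("a.pred" : String) := rfl
theorem m1 (x : String) : (x ++ "(select a.s s, ") ++ "a.o " = x ++ "(select a.s s, a.o " := by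
  rw [String.append_assoc]; rfl
theorem m2 (x : String) : (x ++ ") a ") ++ "left join (" = x ++ ") a left join (" := by
  rw [String.append_assoc]; rfl
theorem m3 (x : String) : (x ++ "(select b.s s, ") ++ "a.o " = x ++ "(select b.s s, a.o " := by
  rw [String.append_assoc]; rfl
theorem m4 (x : String) : (x ++ ") a ") ++ "right join (" = x ++ ") a right join (" := by
  rw [String.append_assoc]; rfl
theorem m5 (x : String) : (x ++ ", b.o ") ++ "pred" = x ++ ", b.o pred" := by
  rw [String.append_assoc]; rfl

set_option maxHeartbeats 1200000 in
theorem A_eq_fold (temp preds types : List String) :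
    ∀ (fuel : Nat) (i : Int) (sql : String),
      (((temp.length : Int) + 1 - i).toNat ≤ fuel) → 1 ≤ i →
      construct_join_sql sql temp i preds types =
        (PySem.List.pyRange i ((temp.length : Int) + 1) 1).foldl (pyB_step temp preds types) sql := by
  intro fuel
  induction fuel with
  | zero =>
    intro i sql hf hi
    have hgt : (temp.length : Int) < i := by omega
    rw [construct_join_sql]
    simp [hgt, PySem.List.pyRange_one_eq_nil (by omega : (temp.length : Int) + 1 ≤ i)]
  | succ n ih =>
    intro i sql hf hi
    by_cases hgt : (temp.length : Int) < i
    · rw [construct_join_sql]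
      simp [hgt, PySem.List.pyRange_one_eq_nil (by omega : (temp.length : Int) + 1 ≤ i)]
    · rw [PySem.List.pyRange_one_cons (by omega : i < (temp.length : Int) + 1), List.foldl_cons,
        ← ih (i + 1) (pyB_step temp preds types sql i) (by omega) (by omega)]
      rcases (by omega : i = 1 ∨ i = 2 ∨ 2 < i) with h1 | h2 | h3
      · subst h1
        rw [construct_join_sql]
        by_cases hm : PySem.List.pyGetD temp 0 "" ∈ types <;>
          simp [hgt, pyB_step, pyB_subquery, hm]
      · subst h2
        rw [construct_join_sql]
        simp only [if_neg hgt, if_neg (by norm_num : ¬ (2 : Int) = 1), if_pos rfl]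
        refine congrArg (fun s => construct_join_sql s temp (2 + 1) preds types) ?_
        simp only [pyB_step, if_neg (by norm_num : ¬ (2 : Int) = 1), if_pos rfl,
          pyB_subquery, pyB_pred]
        norm_num
        by_cases hm : PySem.List.pyGetD temp 1 "" ∈ types <;>
          simp only [hm, not_true, not_false_iff, ite_true, ite_false, if_pos, if_neg] <;>
          simp only [← String.append_assoc] <;>
          simp only [m1, m2, m3, m4]
      · rw [construct_join_sql]
        simp only [if_neg hgt, if_neg (by omega : ¬ i = 1), if_neg (by omega : ¬ i = 2),
          if_pos h3]
        refine congrArg (fun s => construct_join_sql s temp (i + 1) preds types) ?_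
        simp only [pyB_step, if_neg (by omega : ¬ i = 1), if_neg (by omega : ¬ i = 2),
          if_pos h3, pyB_subquery, pyB_pred]
        by_cases hm : PySem.List.pyGetD temp (i - 1) "" ∈ types <;>
          simp only [hm, not_true, not_false_iff, ite_true, ite_false, if_pos, if_neg] <;>
          simp only [← String.append_assoc] <;>
          simp only [mA, m1, m2, m3, m4, m5]

theorem construct_join_sql_spec : Claim_equal_construct_join_sql := by
  intro sql temp i preds types hdom hpre
  show construct_join_sql sql temp i preds types = construct_join_sql_alt sql temp i preds types
  unfold construct_join_sql_alt
  exact A_eq_fold temp preds types (((temp.length : Int) + 1 - i).toNat) i sql le_rfl hpre.1
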